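-- pv_equiv track=rewrite | github.com/Jerjes0/MindMiner | src/utils.py | parse_abstract_to_dict
-- ===== SOURCE A (Python) =====
-- def parse_abstract_to_dict(abstract_text):
--     lines = [line.strip() for line in abstract_text.split("\n") if line.strip()]
--     abstract_dict = {}
--     current_key = None
--     for line in lines:
--         if line.isupper():
--             current_key = line.capitalize()
--             abstract_dict[current_key] = ""
--         elif current_key:
--             abstract_dict[current_key] += (" " if abstract_dict[current_key] else "") + line
--     for key in abstract_dict:
--         abstract_dict[key] = abstract_dict[key].strip()
--     return abstract_dict
-- ===== SOURCE B (Python) =====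
-- def parse_abstract_to_dict(abstract_text):
--     # Two-phase: locate header lines first, then slice the content between
--     # consecutive headers and join it in one go.
--     lines = [line.strip() for line in abstract_text.split("\n") if line.strip()]
--     idxs = [i for i, line in enumerate(lines) if line.isupper()] + [len(lines)]
--     abstract_dict = {}
--     for s, e in zip(idxs, idxs[1:]):
--         abstract_dict[lines[s].capitalize()] = " ".join(lines[s + 1:e])
--     return abstract_dict
-- ===== Notes on version B (the rewrite author's own statement) =====
-- stated objective: alternative
-- what changed: Replaces A's single stateful pass (current-key register with incremental string concatenation and a final re-strip pass) by a two-phase form: first compute all header positions, then build each section by slicing the lines between consecutive headers and joining them once.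
import Mathlib
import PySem

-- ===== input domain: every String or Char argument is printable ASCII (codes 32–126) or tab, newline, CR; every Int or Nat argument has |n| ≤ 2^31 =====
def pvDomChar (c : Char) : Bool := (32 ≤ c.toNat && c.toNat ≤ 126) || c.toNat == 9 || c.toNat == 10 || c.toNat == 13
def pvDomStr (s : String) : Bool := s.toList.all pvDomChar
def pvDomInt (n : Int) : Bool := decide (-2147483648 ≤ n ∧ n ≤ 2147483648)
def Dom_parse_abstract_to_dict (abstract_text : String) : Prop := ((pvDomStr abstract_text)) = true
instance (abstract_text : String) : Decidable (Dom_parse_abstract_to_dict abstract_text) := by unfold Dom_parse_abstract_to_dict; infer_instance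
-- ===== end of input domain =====

-- B replaces A's stateful single pass (current-key register, incremental concatenation, final
-- re-strip) by a two-phase header-index-then-slice form; same result, similar cost (objective: alternative).

-- Python str.isupper(): at least one cased character and every cased character uppercase (exact on ASCII)
def pvIsupper (cs : List Char) : Bool :=
  cs.any PySem.Chars.isupper && cs.all (fun c => !PySem.Chars.islower c)

-- Python str.capitalize(): first character uppercased, the rest lowercased (exact on ASCII)
def pvCapitalize (cs : List Char) : List Char :=
  match cs with
  | [] => []
  | c :: rest => PySem.Chars.upperChar c :: rest.map PySem.Chars.lowerChar

-- ===== PORT A =====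
-- loop body of A's 'for line in lines' (state = (abstract_dict, current_key));
-- 'abstract_dict[current_key] += x' is the read-modify-write on a key that is always present
def pvStepA (st : PySem.Dict (List Char) (List Char) × Option (List Char)) (line : List Char) :
    PySem.Dict (List Char) (List Char) × Option (List Char) :=
  if pvIsupper line then
    let key := pvCapitalize line
    (st.1.insert key [], some key)
  else
    match st.2 with
    | some k =>
        let v := st.1.getD k []
        (st.1.insert k (v ++ (if v.isEmpty then [] else [' ']) ++ line), st.2)
    | none => st

def parse_abstract_to_dict (abstract_text : String) : List (String × String) :=
  let lines := ((PySem.Chars.splitOn abstract_text.toList ['\n']).map PySem.Chars.strip).filter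
      (fun l => !l.isEmpty)
  let st := lines.foldl pvStepA (PySem.Dict.empty, none)
  -- final pass 'for key in abstract_dict: abstract_dict[key] = abstract_dict[key].strip()'
  st.1.items.map (fun p => (String.ofList p.1, String.ofList (PySem.Chars.strip p.2)))

-- ===== PORT B =====
-- loop body of B's 'for s, e in zip(idxs, idxs[1:])'; indices are always in range, so
-- lines[s] is pyGetD and lines[s+1:e] is PySem.List.slice (exact for these nonnegative indices)
def pvStepB (lines : List (List Char)) (d : PySem.Dict (List Char) (List Char)) (se : Int × Int) :
    PySem.Dict (List Char) (List Char) :=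
  d.insert (pvCapitalize (PySem.List.pyGetD lines se.1 []))
    (PySem.Chars.join [' '] (PySem.List.slice lines (some (se.1 + 1)) (some se.2)))

def parse_abstract_to_dict_alt (abstract_text : String) : List (String × String) :=
  let lines := ((PySem.Chars.splitOn abstract_text.toList ['\n']).map PySem.Chars.strip).filter
      (fun l => !l.isEmpty)
  let idxs := ((PySem.List.enumerate lines).filter (fun p => pvIsupper p.2)).map (·.1)
      ++ [(lines.length : Int)]
  let d := (idxs.zip (PySem.List.slice idxs (some 1))).foldl (pvStepB lines) PySem.Dict.empty
  d.items.map (fun p => (String.ofList p.1, String.ofList p.2))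

-- ===== PRECONDITION & SPEC =====
def Spec_parse_abstract_to_dict (abstract_text : String) (out : List (String × String)) : Prop := out = parse_abstract_to_dict_alt abstract_text
instance (abstract_text : String) (out : List (String × String)) : Decidable (Spec_parse_abstract_to_dict abstract_text out) := by unfold Spec_parse_abstract_to_dict; infer_instance

-- ===== CLAIM (what is proved, stated in full; the proofs are below) =====
def Claim_equal_parse_abstract_to_dict : Prop := ∀ (abstract_text : String), Dom_parse_abstract_to_dict abstract_text → Spec_parse_abstract_to_dict abstract_text (parse_abstract_to_dict abstract_text)

-- ===== LEMMAS AND PROOFS =====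

-- the common reference shape: the list of (header, following content lines) groups
def pvChunks : List (List Char) → List (List Char × List (List Char))
  | [] => []
  | l :: rest =>
      if pvIsupper l then (l, rest.takeWhile (fun x => !pvIsupper x)) :: pvChunks rest
      else pvChunks rest

def pvIns (d : PySem.Dict (List Char) (List Char)) (p : List Char × List (List Char)) :
    PySem.Dict (List Char) (List Char) :=
  d.insert (pvCapitalize p.1) (PySem.Chars.join [' '] p.2)

-- A's incremental value accumulator
def pvAcc (v : List Char) (c : List (List Char)) : List Char :=
  c.foldl (fun v l => v ++ (if v.isEmpty then [] else [' ']) ++ l) v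

-- a nonempty line with no surrounding whitespace (the shape of every element of `lines`)
def pvGoodL (l : List Char) : Prop :=
  l ≠ [] ∧ (∀ c, l.head? = some c → PySem.Chars.isspace c = false) ∧
    (∀ c, l.getLast? = some c → PySem.Chars.isspace c = false)

theorem pvDropWhile_eq_self {p : Char → Bool} {l : List Char}
    (h : ∀ c, l.head? = some c → p c = false) : l.dropWhile p = l := by
  cases l with
  | nil => rfl
  | cons a t => simp [h a rfl]

theorem pvStrip_good (s : List Char) (h : PySem.Chars.strip s ≠ []) :
    pvGoodL (PySem.Chars.strip s) := by
  unfold PySem.Chars.strip PySem.Chars.rstrip PySem.Chars.lstrip at *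
  refine ⟨h, ?_, ?_⟩
  · intro c hc
    rw [List.head?_reverse] at hc
    have hpre : (List.dropWhile PySem.Chars.isspace (List.dropWhile PySem.Chars.isspace s).reverse).reverse
        <+: List.dropWhile PySem.Chars.isspace s := by
      have := List.dropWhile_suffix (l := (List.dropWhile PySem.Chars.isspace s).reverse) PySem.Chars.isspace
      obtain ⟨t, ht⟩ := this
      exact ⟨t.reverse, by rw [← List.reverse_append, ht, List.reverse_reverse]⟩
    obtain ⟨t, ht⟩ := hpre
    have hne : (List.dropWhile PySem.Chars.isspace (List.dropWhile PySem.Chars.isspace s).reverse).reverse ≠ [] := h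
    have h1 : (List.dropWhile PySem.Chars.isspace s).head? = some c := by
      rw [← ht, List.head?_append_of_ne_nil _ hne, List.head?_reverse, hc]
    have := List.head?_dropWhile_not PySem.Chars.isspace s
    rw [h1] at this; simpa using this
  · intro c hc
    rw [List.getLast?_reverse] at hc
    have := List.head?_dropWhile_not PySem.Chars.isspace
      ((List.dropWhile PySem.Chars.isspace s).reverse)
    rw [hc] at this; simpa using this

theorem pvStrip_eq_self {l : List Char} (h : pvGoodL l) : PySem.Chars.strip l = l := by
  obtain ⟨hne, hh, hl⟩ := h
  unfold PySem.Chars.strip PySem.Chars.rstrip PySem.Chars.lstrip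
  rw [pvDropWhile_eq_self hh, pvDropWhile_eq_self, List.reverse_reverse]
  intro c hc
  exact hl c (by rwa [List.head?_reverse] at hc)

theorem pvJoin_good (c : List (List Char)) (hne : c ≠ []) (h : ∀ l ∈ c, pvGoodL l) :
    pvGoodL (PySem.Chars.join [' '] c) := by
  induction c with
  | nil => exact absurd rfl hne
  | cons a rest ih =>
    cases rest with
    | nil =>
      rw [PySem.Chars.join_singleton]
      exact h a (by simp)
    | cons b rest' =>
      have hgb : pvGoodL (PySem.Chars.join [' '] (b :: rest')) := by
        refine ih (by simp) ?_
        intro l hlmem; exact h l (by simp [hlmem])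
      have hga : pvGoodL a := h a (by simp)
      rw [PySem.Chars.join_cons_cons]
      refine ⟨by simp [hga.1], ?_, ?_⟩
      · intro cc hcc
        rw [List.append_assoc, List.head?_append_of_ne_nil _ hga.1] at hcc
        exact hga.2.1 cc hcc
      · intro cc hcc
        rw [List.getLast?_append_of_ne_nil _ hgb.1] at hcc
        exact hgb.2.2 cc hcc

theorem pvStrip_join (c : List (List Char)) (h : ∀ l ∈ c, pvGoodL l) :
    PySem.Chars.strip (PySem.Chars.join [' '] c) = PySem.Chars.join [' '] c := by
  cases c with
  | nil => decide
  | cons a rest => exact pvStrip_eq_self (pvJoin_good _ (by simp) h)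

theorem pvAcc_nil_eq_join (c : List (List Char)) (h : ∀ l ∈ c, l ≠ []) :
    pvAcc [] c = PySem.Chars.join [' '] c := by
  cases c with
  | nil => rfl
  | cons a rest =>
    induction rest generalizing a with
    | nil => simp [pvAcc, PySem.Chars.join_singleton]
    | cons b rest' ih =>
      have ha : a ≠ [] := h a (by simp)
      have hstep : pvAcc [] (a :: b :: rest') = pvAcc [] ((a ++ [' '] ++ b) :: rest') := by
        simp [pvAcc, List.foldl_cons, ha, List.append_assoc]
      have hmem : ∀ l ∈ (a ++ [' '] ++ b) :: rest', l ≠ [] := by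
        intro l hl
        rcases List.mem_cons.1 hl with h1 | h1
        · subst h1; simp [ha]
        · exact h l (by simp [h1])
      rw [hstep, ih (a ++ [' '] ++ b) hmem, PySem.Chars.join_cons_cons]
      cases rest' with
      | nil => rw [PySem.Chars.join_singleton, PySem.Chars.join_singleton]
      | cons d r =>
        rw [PySem.Chars.join_cons_cons, PySem.Chars.join_cons_cons]
        simp [List.append_assoc]

theorem pvFoldA_some (lines : List (List Char)) (hg : ∀ l ∈ lines, l ≠ []) :
    ∀ (d : PySem.Dict (List Char) (List Char)) (k v : List Char),
    (lines.foldl pvStepA (d.insert k v, some k)).1 =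
      (pvChunks lines).foldl pvIns
        (d.insert k (pvAcc v (lines.takeWhile (fun x => !pvIsupper x)))) := by
  induction lines with
  | nil => intro d k v; simp [pvChunks, pvAcc]
  | cons l rest ih =>
    intro d k v
    by_cases hl : pvIsupper l = true
    · rw [List.foldl_cons]
      have hstep : pvStepA (d.insert k v, some k) l =
          ((d.insert k v).insert (pvCapitalize l) [], some (pvCapitalize l)) := by
        simp [pvStepA, hl]
      rw [hstep, ih (fun l hm => hg l (by simp [hm])) (d.insert k v) (pvCapitalize l) []]
      have hj : pvAcc [] (rest.takeWhile (fun x => !pvIsupper x)) =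
          PySem.Chars.join [' '] (rest.takeWhile (fun x => !pvIsupper x)) :=
        pvAcc_nil_eq_join _ (fun l hm =>
          hg l (by simp [(List.takeWhile_sublist _).subset hm]))
      simp [pvChunks, hl, pvIns, pvAcc] at hj ⊢
      rw [← hj]
    · rw [List.foldl_cons]
      have hv : (d.insert k v).getD k [] = v := by
        rw [PySem.Dict.getD_insert]; simp
      have hstep : pvStepA (d.insert k v, some k) l =
          (d.insert k (v ++ (if v.isEmpty then [] else [' ']) ++ l), some k) := by
        simp only [pvStepA, hl]
        rw [if_neg (by simp)]
        simp [hv, PySem.Dict.insert_insert_self]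
      rw [hstep, ih (fun l hm => hg l (by simp [hm])) d k
        (v ++ (if v.isEmpty then [] else [' ']) ++ l)]
      have htw : (l :: rest).takeWhile (fun x => !pvIsupper x) =
          l :: rest.takeWhile (fun x => !pvIsupper x) := by
        simp [hl]
      rw [htw]
      have : pvAcc v (l :: rest.takeWhile (fun x => !pvIsupper x)) =
          pvAcc (v ++ (if v.isEmpty then [] else [' ']) ++ l)
            (rest.takeWhile (fun x => !pvIsupper x)) := rfl
      rw [this]
      simp [pvChunks, hl]

theorem pvFoldA_none (lines : List (List Char)) (hg : ∀ l ∈ lines, l ≠ []) :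
    ∀ (d : PySem.Dict (List Char) (List Char)),
    (lines.foldl pvStepA (d, none)).1 = (pvChunks lines).foldl pvIns d := by
  induction lines with
  | nil => intro d; simp [pvChunks]
  | cons l rest ih =>
    intro d
    by_cases hl : pvIsupper l = true
    · rw [List.foldl_cons]
      have hstep : pvStepA (d, none) l =
          (d.insert (pvCapitalize l) [], some (pvCapitalize l)) := by
        simp [pvStepA, hl]
      rw [hstep, pvFoldA_some rest (fun l hm => hg l (by simp [hm])) d (pvCapitalize l) []]
      have hj : pvAcc [] (rest.takeWhile (fun x => !pvIsupper x)) =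
          PySem.Chars.join [' '] (rest.takeWhile (fun x => !pvIsupper x)) :=
        pvAcc_nil_eq_join _ (fun l hm =>
          hg l (by simp [(List.takeWhile_sublist _).subset hm]))
      simp [pvChunks, hl, pvIns, pvAcc] at hj ⊢
      rw [← hj]
    · rw [List.foldl_cons]
      have hstep : pvStepA (d, none) l = (d, none) := by simp [pvStepA, hl]
      rw [hstep, ih (fun l hm => hg l (by simp [hm])) d]
      simp [pvChunks, hl]

-- B side: the Nat-valued header-index list and its pair fold
def pvEN : List (List Char) → List Nat
  | [] => []
  | a :: l => if pvIsupper a then 0 :: (pvEN l).map (· + 1) else (pvEN l).map (· + 1)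

def pvIN (lines : List (List Char)) : List Nat := pvEN lines ++ [lines.length]

def pvStepN (lines : List (List Char)) (d : PySem.Dict (List Char) (List Char)) (se : Nat × Nat) :
    PySem.Dict (List Char) (List Char) :=
  d.insert (pvCapitalize (lines.getD se.1 []))
    (PySem.Chars.join [' '] ((lines.drop (se.1 + 1)).take (se.2 - (se.1 + 1))))

theorem pvEnum_eq (lines : List (List Char)) :
    ∀ (k : Int), ((PySem.List.enumerate lines k).filter (fun p => pvIsupper p.2)).map (·.1) =
      (pvEN lines).map (fun (i : Nat) => (i : Int) + k) := by
  induction lines with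
  | nil => intro k; simp [pvEN, PySem.List.enumerate]
  | cons a l ih =>
    intro k
    rw [PySem.List.enumerate_cons]
    have hmaps : (pvEN l).map (fun (i : Nat) => ((i : Int) + (k + 1))) =
        ((pvEN l).map (· + 1)).map (fun (i : Nat) => (i : Int) + k) := by
      rw [List.map_map]
      refine List.map_congr_left (fun i _ => ?_)
      simp only [Function.comp]
      push_cast; ring
    by_cases ha : pvIsupper a = true
    · rw [List.filter_cons_of_pos (by simpa using ha), List.map_cons, ih (k + 1)]
      simp only [pvEN, if_pos ha, List.map_cons, hmaps]
      simp
    · rw [List.filter_cons_of_neg (by simpa using ha), ih (k + 1)]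
      simp only [pvEN, if_neg ha, hmaps]

theorem pvIN_ne_nil (lines : List (List Char)) : pvIN lines ≠ [] := by
  simp [pvIN]

theorem pvIN_head (lines : List (List Char)) :
    (pvIN lines).head? = some (lines.takeWhile (fun x => !pvIsupper x)).length := by
  induction lines with
  | nil => simp [pvIN, pvEN]
  | cons a l ih =>
    by_cases ha : pvIsupper a = true
    · simp [pvIN, pvEN, ha]
    · have h1 : pvIN (a :: l) = (pvIN l).map (· + 1) := by
        simp [pvIN, pvEN, ha]
      rw [h1, List.head?_map, ih]
      simp [ha]

theorem pvFoldN_shift (ps : List (Nat × Nat)) (a : List Char) (rest : List (List Char))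
    (d : PySem.Dict (List Char) (List Char)) :
    (ps.map (fun p => (p.1 + 1, p.2 + 1))).foldl (pvStepN (a :: rest)) d =
      ps.foldl (pvStepN rest) d := by
  rw [List.foldl_map]
  congr 1
  funext d' p
  simp [pvStepN, Nat.add_sub_add_right]

theorem pvFoldB (lines : List (List Char)) :
    ∀ (d : PySem.Dict (List Char) (List Char)),
    ((pvIN lines).zip (pvIN lines).tail).foldl (pvStepN lines) d =
      (pvChunks lines).foldl pvIns d := by
  induction lines with
  | nil => intro d; simp [pvIN, pvEN, pvChunks]
  | cons a rest ih =>
    intro d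
    have hzipmap : ∀ (x : List Nat),
        ((x.map (· + 1)).zip (x.map (· + 1)).tail) =
          (x.zip x.tail).map (fun p => (p.1 + 1, p.2 + 1)) := by
      intro x
      rw [← List.map_tail, List.zip_map]
      rfl
    by_cases ha : pvIsupper a = true
    · have h1 : pvIN (a :: rest) = 0 :: (pvIN rest).map (· + 1) := by
        simp [pvIN, pvEN, ha]
      obtain ⟨j, js, hjs⟩ : ∃ j js, pvIN rest = j :: js := by
        cases hI : pvIN rest with
        | nil => exact absurd hI (pvIN_ne_nil rest)
        | cons j js => exact ⟨j, js, rfl⟩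
      have hhead : j = (rest.takeWhile (fun x => !pvIsupper x)).length := by
        have := pvIN_head rest; rw [hjs] at this; simpa using this
      have hfirst : pvStepN (a :: rest) d (0, j + 1) =
          pvIns d (a, rest.takeWhile (fun x => !pvIsupper x)) := by
        simp only [pvStepN, pvIns, hhead]
        rw [Nat.add_sub_cancel, List.getD_cons_zero, Nat.zero_add, List.drop_one,
          List.tail_cons, ← List.prefix_iff_eq_take.1 (List.takeWhile_prefix _)]
      have h2 : (pvIN (a :: rest)).zip (pvIN (a :: rest)).tail =
          (0, j + 1) :: ((pvIN rest).zip (pvIN rest).tail).map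
            (fun p => (p.1 + 1, p.2 + 1)) := by
        rw [h1, ← hzipmap (pvIN rest), hjs]
        simp [List.zip_cons_cons]
      rw [h2, List.foldl_cons, hfirst, pvFoldN_shift, ih]
      simp [pvChunks, ha, pvIns]
    · have h1 : pvIN (a :: rest) = (pvIN rest).map (· + 1) := by
        simp [pvIN, pvEN, ha]
      rw [h1, hzipmap, pvFoldN_shift, ih d]
      simp [pvChunks, ha]

theorem pvChunk_content_mem (lines : List (List Char)) :
    ∀ p ∈ pvChunks lines, ∀ l ∈ p.2, l ∈ lines := by
  induction lines with
  | nil => simp [pvChunks]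
  | cons a rest ih =>
    intro p hp l hl
    by_cases ha : pvIsupper a = true
    · simp only [pvChunks, if_pos ha, List.mem_cons] at hp
      rcases hp with hp | hp
      · subst hp
        exact List.mem_cons_of_mem a ((List.takeWhile_sublist _).subset hl)
      · exact List.mem_cons_of_mem a (ih p hp l hl)
    · simp only [pvChunks, if_neg ha] at hp
      exact List.mem_cons_of_mem a (ih p hp l hl)

theorem pvItems_vals (cs : List (List Char × List (List Char)))
    (h : ∀ p ∈ cs, PySem.Chars.strip (PySem.Chars.join [' '] p.2) = PySem.Chars.join [' '] p.2) :
    ∀ (d : PySem.Dict (List Char) (List Char)),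
    (∀ kv ∈ d.items, PySem.Chars.strip kv.2 = kv.2) →
    ∀ kv ∈ (cs.foldl pvIns d).items, PySem.Chars.strip kv.2 = kv.2 := by
  induction cs with
  | nil => intro d hd kv hkv; exact hd kv hkv
  | cons c cs' ih =>
    intro d hd kv hkv
    refine ih (fun p hp => h p (by simp [hp])) (pvIns d c) ?_ kv hkv
    intro kv' hkv'
    have hc := h c (by simp)
    simp only [pvIns, PySem.Dict.items_insert] at hkv'
    by_cases hcont : d.contains (pvCapitalize c.1) = true
    · rw [if_pos hcont] at hkv'
      obtain ⟨p, hp, hpe⟩ := List.mem_map.1 hkv'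
      by_cases hpk : (p.1 == pvCapitalize c.1) = true
      · rw [if_pos hpk] at hpe; rw [← hpe]; exact hc
      · rw [if_neg hpk] at hpe; rw [← hpe]; exact hd p hp
    · rw [if_neg hcont, List.mem_append] at hkv'
      rcases hkv' with hkv' | hkv'
      · exact hd kv' hkv'
      · simp only [List.mem_singleton] at hkv'
        rw [hkv']; exact hc

-- ===== VERDICT (by name: the statement is the Claim_ definition above) =====
theorem parse_abstract_to_dict_spec : Claim_equal_parse_abstract_to_dict := by
  intro text _
  unfold Spec_parse_abstract_to_dict parse_abstract_to_dict parse_abstract_to_dict_alt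
  set L := ((PySem.Chars.splitOn text.toList ['\n']).map PySem.Chars.strip).filter
      (fun l => !l.isEmpty) with hL
  have hg : ∀ l ∈ L, l ≠ [] := by
    intro l hl
    have := (List.mem_filter.1 hl).2
    simpa using this
  have hgood : ∀ l ∈ L, pvGoodL l := by
    intro l hl
    obtain ⟨hm, hne⟩ := List.mem_filter.1 hl
    obtain ⟨s, _, rfl⟩ := List.mem_map.1 hm
    exact pvStrip_good s (by simpa using hne)
  have hA : (L.foldl pvStepA (PySem.Dict.empty, none)).1 =
      (pvChunks L).foldl pvIns PySem.Dict.empty := pvFoldA_none L hg _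
  have hidx : ((PySem.List.enumerate L).filter (fun p => pvIsupper p.2)).map (·.1)
      ++ [(L.length : Int)] = (pvIN L).map (fun (i : Nat) => (i : Int)) := by
    rw [pvEnum_eq L 0]
    simp [pvIN]
  have hstep : ∀ d (p : Nat × Nat), pvStepB L d ((p.1 : Int), (p.2 : Int)) = pvStepN L d p := by
    intro d p
    simp only [pvStepB, pvStepN, PySem.List.pyGetD_natCast]
    have h1 : ((p.1 : Int) + 1) = ((p.1 + 1 : Nat) : Int) := by push_cast; ring
    rw [h1, PySem.List.slice_toNat L (by positivity) (by positivity)]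
    simp [List.getD]
  have hB : ((((PySem.List.enumerate L).filter (fun p => pvIsupper p.2)).map (·.1)
        ++ [(L.length : Int)]).zip
        (PySem.List.slice (((PySem.List.enumerate L).filter (fun p => pvIsupper p.2)).map (·.1)
        ++ [(L.length : Int)]) (some 1))).foldl (pvStepB L) PySem.Dict.empty =
      (pvChunks L).foldl pvIns PySem.Dict.empty := by
    rw [hidx, PySem.List.slice_from _ (by norm_num)]
    have htoNat : (1 : Int).toNat = 1 := rfl
    rw [htoNat, List.drop_one, ← List.map_tail, List.zip_map, List.foldl_map]
    have hfun : (fun (d : PySem.Dict (List Char) (List Char)) (p : Nat × Nat) =>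
        pvStepB L d (Prod.map (fun (i : Nat) => (i : Int)) (fun (i : Nat) => (i : Int)) p)) =
        pvStepN L := by
      funext d p
      exact hstep d p
    rw [hfun, pvFoldB L]
  have hvals : ∀ kv ∈ ((pvChunks L).foldl pvIns PySem.Dict.empty).items,
      PySem.Chars.strip kv.2 = kv.2 := by
    refine pvItems_vals (pvChunks L)
      (fun p hp => pvStrip_join _ (fun l hl => hgood l (pvChunk_content_mem L p hp l hl)))
      PySem.Dict.empty ?_
    intro kv hkv
    simp [PySem.Dict.empty] at hkv
  dsimp only
  rw [hA, hB]
  refine List.map_congr_left ?_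
  intro kv hkv
  rw [hvals kv hkv]
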